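-- pv_equiv track=rewrite | github.com/kassaab/part4 | 29_length_of_longest/length_of_longest.py | length_of_longest
-- ===== SOURCE A (Python) =====
-- def length_of_longest(my_list):
--     longest = len(my_list[0])
--     i = 1
--     while i < len(my_list):
--         if len(my_list[i]) > longest:
--             longest = len(my_list[i])
--         i += 1
--     return longest
-- ===== SOURCE B (Python) =====
-- def length_of_longest(my_list):
--     return len(sorted(my_list, key=len, reverse=True)[0])
-- ===== Notes on version B (the rewrite author's own statement) =====
-- stated objective: alternative
-- what changed: Replaces the explicit index-based max-tracking while loop with a sort-by-length (descending) followed by taking the first element's length.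
import Mathlib
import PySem

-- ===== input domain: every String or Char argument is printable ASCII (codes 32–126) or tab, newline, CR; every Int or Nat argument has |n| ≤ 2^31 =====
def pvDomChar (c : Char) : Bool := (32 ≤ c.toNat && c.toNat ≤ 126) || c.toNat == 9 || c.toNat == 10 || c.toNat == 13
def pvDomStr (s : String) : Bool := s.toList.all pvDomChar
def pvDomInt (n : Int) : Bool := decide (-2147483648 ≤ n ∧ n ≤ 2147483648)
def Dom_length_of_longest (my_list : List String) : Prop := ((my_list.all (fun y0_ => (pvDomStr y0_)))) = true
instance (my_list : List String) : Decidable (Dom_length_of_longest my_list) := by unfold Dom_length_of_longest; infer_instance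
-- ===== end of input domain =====

-- B replaces A's index-based max-tracking while loop by sorting the list by length
-- descending and taking the first element's length (objective: alternative algorithm).

-- ===== PORT A =====
-- the while loop: i scans indices, 'longest' tracks the running maximum length
def lolLoop (my_list : List String) (longest : Int) (i : Nat) : Int :=
  if _h : i < my_list.length then
    lolLoop my_list
      (if PySem.Str.len my_list[i] > longest then PySem.Str.len my_list[i] else longest)
      (i + 1)
  else longest
termination_by my_list.length - i

def length_of_longest (my_list : List String) : Int :=
  match PySem.List.pyGet? my_list 0 with   -- my_list[0]; none = IndexError (excluded by Pre_)
  | none => 0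
  | some s0 => lolLoop my_list (PySem.Str.len s0) 1

-- ===== PORT B =====
def length_of_longest_alt (my_list : List String) : Int :=
  match PySem.List.pyGet? (PySem.List.sorted my_list (fun s => PySem.Str.len s) true) 0 with
  | none => 0                               -- [0] on empty sorted list = IndexError (excluded by Pre_)
  | some m => PySem.Str.len m

-- ===== PRECONDITION & SPEC =====
-- A raises IndexError on the empty list (my_list[0]); B also raises there (sorted(...)[0]).
def Pre_length_of_longest (my_list : List String) : Prop := my_list ≠ []
instance (my_list : List String) : Decidable (Pre_length_of_longest my_list) := by unfold Pre_length_of_longest; infer_instance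
def pvWitness_length_of_longest : List String := ["ab"]

def Spec_length_of_longest (my_list : List String) (out : Int) : Prop := out = length_of_longest_alt my_list
instance (my_list : List String) (out : Int) : Decidable (Spec_length_of_longest my_list out) := by unfold Spec_length_of_longest; infer_instance

-- ===== CLAIM (what is proved, stated in full; the proofs are below) =====
def Claim_equal_length_of_longest : Prop := ∀ (my_list : List String), Dom_length_of_longest my_list → Pre_length_of_longest my_list → Spec_length_of_longest my_list (length_of_longest my_list)

-- ===== LEMMAS AND PROOFS =====

-- the loop equals a left fold of the max step over the suffix from index i
theorem lolLoop_eq_foldl (my_list : List String) (longest : Int) (i : Nat) :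
    lolLoop my_list longest i =
      (my_list.drop i).foldl
        (fun acc s => if PySem.Str.len s > acc then PySem.Str.len s else acc) longest := by
  induction hn : my_list.length - i generalizing longest i with
  | zero =>
      rw [lolLoop]
      have h : ¬ i < my_list.length := by omega
      rw [dif_neg h, List.drop_eq_nil_of_le (show my_list.length ≤ i by omega), List.foldl_nil]
  | succ n ih =>
      rw [lolLoop]
      have h : i < my_list.length := by omega
      rw [dif_pos h, ih _ (i + 1) (by omega), List.drop_eq_getElem_cons h, List.foldl_cons]

-- the fold's result is the init or the key of some element of the list
theorem foldl_max_mem {α : Type} (f : α → Int) (xs : List α) (init : Int) :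
    (xs.foldl (fun acc s => if f s > acc then f s else acc) init) = init
    ∨ ∃ s ∈ xs, (xs.foldl (fun acc s => if f s > acc then f s else acc) init) = f s := by
  induction xs generalizing init with
  | nil => simp
  | cons x t ih =>
      rw [List.foldl_cons]
      rcases ih (if f x > init then f x else init) with h | ⟨s, hs, h⟩
      · by_cases hx : f x > init
        · right; exact ⟨x, List.mem_cons_self, by rw [h, if_pos hx]⟩
        · left; rw [h, if_neg hx]
      · right; exact ⟨s, List.mem_cons_of_mem x hs, h⟩

-- the fold's result dominates the init and every element's key
theorem foldl_max_ge {α : Type} (f : α → Int) (xs : List α) (init : Int) :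
    init ≤ (xs.foldl (fun acc s => if f s > acc then f s else acc) init)
    ∧ ∀ s ∈ xs, f s ≤ (xs.foldl (fun acc s => if f s > acc then f s else acc) init) := by
  induction xs generalizing init with
  | nil => simp
  | cons x t ih =>
      rw [List.foldl_cons]
      obtain ⟨h1, h2⟩ := ih (if f x > init then f x else init)
      have hinit : init ≤ (if f x > init then f x else init) := by split_ifs <;> omega
      have hx : f x ≤ (if f x > init then f x else init) := by split_ifs <;> omega
      refine ⟨le_trans hinit h1, ?_⟩
      intro s hs
      rcases List.mem_cons.mp hs with rfl | hs
      · exact le_trans hx h1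
      · exact h2 s hs

-- ===== VERDICT (by name: the statement is the Claim_ definition above) =====
theorem length_of_longest_spec : Claim_equal_length_of_longest := by
  intro my_list _hdom hpre
  unfold Spec_length_of_longest
  obtain ⟨x, t, rfl⟩ : ∃ x t, my_list = x :: t := by
    cases my_list with
    | nil => exact absurd rfl hpre
    | cons x t => exact ⟨x, t, rfl⟩
  -- name the descending-sorted list and its head
  have hsne : PySem.List.sorted (x :: t) (fun s => PySem.Str.len s) true ≠ [] := by
    simp [PySem.List.sorted_eq_nil_iff]
  obtain ⟨m, ss, hss⟩ : ∃ m ss, PySem.List.sorted (x :: t) (fun s => PySem.Str.len s) true = m :: ss := by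
    cases h : PySem.List.sorted (x :: t) (fun s => PySem.Str.len s) true with
    | nil => exact absurd h hsne
    | cons m ss => exact ⟨m, ss, rfl⟩
  have hmax : ∀ y ∈ (x :: t), PySem.Str.len y ≤ PySem.Str.len m :=
    PySem.List.key_head_sorted_rev_ge _ _ hss
  have hmem : m ∈ (x :: t) := by
    have hm : m ∈ PySem.List.sorted (x :: t) (fun s => PySem.Str.len s) true := by
      rw [hss]; exact List.mem_cons_self
    exact (PySem.List.mem_sorted _ _ _ _).mp hm
  -- unfold both ports
  unfold length_of_longest length_of_longest_alt
  rw [hss]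
  simp only [PySem.List.pyGet?_zero_cons]
  rw [lolLoop_eq_foldl]
  simp only [List.drop_one, List.tail_cons]
  -- A's value = len m by antisymmetry
  obtain ⟨hinit, hall⟩ := foldl_max_ge PySem.Str.len t (PySem.Str.len x)
  have hub : List.foldl (fun acc s => if PySem.Str.len s > acc then PySem.Str.len s else acc) (PySem.Str.len x) t ≤ PySem.Str.len m := by
    rcases foldl_max_mem PySem.Str.len t (PySem.Str.len x) with h | ⟨s, hs, h⟩
    · rw [h]; exact hmax x (by simp)
    · rw [h]; exact hmax s (by simp [hs])
  have hlb : PySem.Str.len m ≤ List.foldl (fun acc s => if PySem.Str.len s > acc then PySem.Str.len s else acc) (PySem.Str.len x) t := by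
    rcases List.mem_cons.mp hmem with rfl | hm
    · exact hinit
    · exact hall m hm
  omega
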